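-- pv_equiv track=rewrite | github.com/AxelSchneewind/cpa | test_progs/even_odd_accumulate_unsafe.py | accumulate_buggy
-- ===== SOURCE A (Python) =====
-- def inc(x):
--     return x + 1
--
-- def accumulate_buggy(n, m):
--     i = 0
--     total = 0
--     while i < n:
--         j = 0
--         while j < m:
--             # BUG: both branches use i*j
--             if (i + j) % 2 == 0:
--                 total += i * j
--             else:
--                 total += i * j
--             j = inc(j)
--         i = inc(i)
--     return total
-- ===== SOURCE B (Python) =====
-- def accumulate_buggy(n, m):
--     # closed form: sum_{i<n} sum_{j<m} i*j = T(n) * T(m), T(k) = k(k-1)/2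
--     tn = n * (n - 1) // 2 if n > 0 else 0
--     tm = m * (m - 1) // 2 if m > 0 else 0
--     return tn * tm
-- ===== Notes on version B (the rewrite author's own statement) =====
-- stated objective: faster
-- what changed: Replaced the nested while-loops summing i*j over the n x m grid by the closed form T(n)*T(m) with T(k)=k(k-1)//2 (0 for k<=0).
import Mathlib
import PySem

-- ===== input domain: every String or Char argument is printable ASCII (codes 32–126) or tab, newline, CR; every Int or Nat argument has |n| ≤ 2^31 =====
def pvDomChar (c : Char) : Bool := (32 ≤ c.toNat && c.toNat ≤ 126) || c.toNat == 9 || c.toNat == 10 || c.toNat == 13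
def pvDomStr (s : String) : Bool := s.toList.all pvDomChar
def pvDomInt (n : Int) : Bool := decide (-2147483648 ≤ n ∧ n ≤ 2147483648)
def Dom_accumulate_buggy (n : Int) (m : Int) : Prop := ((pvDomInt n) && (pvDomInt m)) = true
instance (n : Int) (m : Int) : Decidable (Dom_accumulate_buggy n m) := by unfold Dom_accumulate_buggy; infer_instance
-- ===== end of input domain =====

-- B replaces A's O(n*m) nested while-loops by the O(1) closed form T(n)*T(m), T(k)=k(k-1)//2.

-- ===== PORT A =====
-- helper 'inc' of A
def pvInc (x : Int) : Int := x + 1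

-- inner while loop of A, fuel = number of remaining iterations ((m - j).toNat at entry)
def pvInnerA (m i : Int) (j total : Int) : Nat → Int
  | 0 => total
  | f + 1 =>
    if j < m then
      pvInnerA m i (pvInc j) (if (i + j) % 2 = 0 then total + i * j else total + i * j) f
    else total

-- outer while loop of A
def pvOuterA (n m : Int) (i total : Int) : Nat → Int
  | 0 => total
  | f + 1 =>
    if i < n then
      pvOuterA n m (pvInc i) (pvInnerA m i 0 total (m - 0).toNat) f
    else total

def accumulate_buggy (n : Int) (m : Int) : Int :=
  pvOuterA n m 0 0 (n - 0).toNat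

-- ===== PORT B =====
def accumulate_buggy_alt (n : Int) (m : Int) : Int :=
  let tn := if 0 < n then PySem.Int.floordiv (n * (n - 1)) 2 else 0
  let tm := if 0 < m then PySem.Int.floordiv (m * (m - 1)) 2 else 0
  tn * tm

-- ===== PRECONDITION & SPEC =====
def Spec_accumulate_buggy (n : Int) (m : Int) (out : Int) : Prop := out = accumulate_buggy_alt n m
instance (n : Int) (m : Int) (out : Int) : Decidable (Spec_accumulate_buggy n m out) := by unfold Spec_accumulate_buggy; infer_instance

-- ===== CLAIM (what is proved, stated in full; the proofs are below) =====
def Claim_equal_accumulate_buggy : Prop := ∀ (n : Int) (m : Int), Dom_accumulate_buggy n m → Spec_accumulate_buggy n m (accumulate_buggy n m)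

-- ===== LEMMAS AND PROOFS =====

-- sum of f consecutive integers starting at j
def pvSumF : Nat → Int → Int
  | 0, _ => 0
  | f + 1, j => j + pvSumF f (j + 1)

theorem pvSumF_closed (f : Nat) (j : Int) : 2 * pvSumF f j = f * (2 * j + f - 1) := by
  induction f generalizing j with
  | zero => simp [pvSumF]
  | succ f ih =>
    simp only [pvSumF]
    have := ih (j + 1)
    push_cast at *
    ring_nf at *
    omega

theorem pvInnerA_eq (m i : Int) (f : Nat) (j total : Int) (h : j + f = m) :
    pvInnerA m i j total f = total + i * pvSumF f j := by
  induction f generalizing j total with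
  | zero => simp [pvInnerA, pvSumF]
  | succ f ih =>
    have hj : j < m := by omega
    have h' : (j + 1) + (f : Int) = m := by push_cast at h ⊢; omega
    simp only [pvInnerA, pvInc, if_pos hj, ite_self, ih _ _ h', pvSumF]
    ring

theorem pvInner_val (m i total : Int) :
    pvInnerA m i 0 total (m - 0).toNat = total + i * pvSumF (m - 0).toNat 0 := by
  by_cases hm : 0 ≤ m
  · exact pvInnerA_eq m i _ 0 total (by omega)
  · have h0 : (m - 0).toNat = 0 := by omega
    rw [h0]; simp [pvInnerA, pvSumF]

theorem pvOuterA_eq (n m : Int) (f : Nat) (i total : Int) (h : i + f = n) :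
    pvOuterA n m i total f = total + pvSumF f i * pvSumF (m - 0).toNat 0 := by
  induction f generalizing i total with
  | zero => simp [pvOuterA, pvSumF]
  | succ f ih =>
    have hi : i < n := by omega
    have h' : (i + 1) + (f : Int) = n := by push_cast at h ⊢; omega
    simp only [pvOuterA, pvInc]
    rw [if_pos hi, pvInner_val, ih _ _ h']
    simp only [pvSumF]
    ring

theorem pvOuter_val (n m : Int) :
    pvOuterA n m 0 0 (n - 0).toNat = pvSumF (n - 0).toNat 0 * pvSumF (m - 0).toNat 0 := by
  by_cases hn : 0 ≤ n
  · rw [pvOuterA_eq n m _ 0 0 (by omega)]; ring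
  · have h0 : (n - 0).toNat = 0 := by omega
    rw [h0]; simp [pvOuterA, pvSumF]

theorem pvT_eq (k : Int) : pvSumF (k - 0).toNat 0 =
    (if 0 < k then PySem.Int.floordiv (k * (k - 1)) 2 else 0) := by
  by_cases hk : 0 < k
  · have hc : (0 : Int) + ((k - 0).toNat : Int) = k := by omega
    have h2 := pvSumF_closed (k - 0).toNat 0
    rw [if_pos hk]
    have hval : 2 * pvSumF (k - 0).toNat 0 = k * (k - 1) := by
      rw [h2]; push_cast at hc ⊢; nlinarith [hc]
    rw [PySem.Int.floordiv_eq_ediv_of_pos (by norm_num), ← hval]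
    omega
  · have h0 : (k - 0).toNat = 0 := by omega
    rw [h0]; simp [pvSumF, hk]

-- ===== VERDICT (by name: the statement is the Claim_ definition above) =====
theorem accumulate_buggy_spec : Claim_equal_accumulate_buggy := by
  intro n m _
  unfold Spec_accumulate_buggy accumulate_buggy accumulate_buggy_alt
  rw [pvOuter_val, pvT_eq n, pvT_eq m]
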